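-- pv_equiv track=rewrite | github.com/pablomarcel/vICE | simulator/cli.py | _generate_api_rst
-- ===== SOURCE A (Python) =====
-- from typing import Sequence
--
-- _RST_CHARS = ("=", "-", "~", "^")
--
-- def _rst_heading(title: str, level: int = 0) -> str:
--     """Return a Sphinx-safe reStructuredText heading."""
--     ch = _RST_CHARS[min(max(level, 0), len(_RST_CHARS) - 1)]
--     text = str(title).strip() or "Untitled"
--     return f"{text}\n{ch * len(text)}\n"
--
-- def _module_group(module_name: str) -> str:
--     """Return a readable documentation group for a module name."""
--     if module_name.startswith("simulator.thermo.tools."):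
--         return "Thermochemistry Tools"
--     if module_name.startswith("simulator.thermo."):
--         return "Thermochemistry Core"
--     if module_name.startswith("simulator.tools."):
--         return "Engineering Tools"
--     return "Simulator Core"
--
-- _PACKAGE_SUMMARY_MODULES: tuple[str, ...] = (
--     "simulator",
--     "simulator.pumps",
-- )
--
-- def _automodule_block(module_name: str) -> str:
--     """Return a duplicate-safe automodule block for ``api.rst``."""
--     if module_name in _PACKAGE_SUMMARY_MODULES:
--         return f".. automodule:: {module_name}\n\n"
--     return (
--         f".. automodule:: {module_name}\n"
--         "   :members:\n"
--         "   :undoc-members:\n"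
--         "   :show-inheritance:\n\n"
--     )
--
-- def _generate_api_rst(modules: Sequence[str]) -> str:
--     """Generate a duplicate-safe API page for importable simulator modules."""
--     parts: list[str] = [_rst_heading("API Reference", 0)]
--
--     grouped: dict[str, list[str]] = {}
--     for mod in modules:
--         grouped.setdefault(_module_group(mod), []).append(mod)
--
--     group_order = [
--         "Simulator Core",
--         "Thermochemistry Core",
--         "Thermochemistry Tools",
--         "Engineering Tools",
--     ]
--
--     for group in group_order:
--         mods = grouped.get(group, [])
--         if not mods:
--             continue
--         parts.append(_rst_heading(group, 1))
--         for mod in mods: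
--             parts.append(_rst_heading(mod, 2))
--             parts.append(_automodule_block(mod))
--
--     return "\n".join(parts).rstrip() + "\n"
-- ===== SOURCE B (Python) =====
-- from typing import Sequence
--
-- _RST_CHARS = ("=", "-", "~", "^")
--
-- def _rst_heading(title: str, level: int = 0) -> str:
--     ch = _RST_CHARS[min(max(level, 0), len(_RST_CHARS) - 1)]
--     text = str(title).strip() or "Untitled"
--     return f"{text}\n{ch * len(text)}\n"
--
-- def _module_group(module_name: str) -> str:
--     if module_name.startswith("simulator.thermo.tools."):
--         return "Thermochemistry Tools"
--     if module_name.startswith("simulator.thermo."):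
--         return "Thermochemistry Core"
--     if module_name.startswith("simulator.tools."):
--         return "Engineering Tools"
--     return "Simulator Core"
--
-- _PACKAGE_SUMMARY_MODULES: tuple[str, ...] = (
--     "simulator",
--     "simulator.pumps",
-- )
--
-- def _automodule_block(module_name: str) -> str:
--     if module_name in _PACKAGE_SUMMARY_MODULES:
--         return f".. automodule:: {module_name}\n\n"
--     return (
--         f".. automodule:: {module_name}\n"
--         "   :members:\n"
--         "   :undoc-members:\n"
--         "   :show-inheritance:\n\n"
--     )
--
-- _GROUP_ORDER = (
--     "Simulator Core",
--     "Thermochemistry Core",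
--     "Thermochemistry Tools",
--     "Engineering Tools",
-- )
--
-- def _group_section(modules: Sequence[str], group: str) -> list[str]:
--     """Section for one group: heading plus per-module blocks, empty if no modules."""
--     mods = [m for m in modules if _module_group(m) == group]
--     if not mods:
--         return []
--     return [_rst_heading(group, 1)] + [
--         part for m in mods for part in (_rst_heading(m, 2), _automodule_block(m))
--     ]
--
-- def _generate_api_rst(modules: Sequence[str]) -> str:
--     """Generate the API page without building an intermediate grouping dict."""
--     parts = [_rst_heading("API Reference", 0)] + [
--         part for group in _GROUP_ORDER for part in _group_section(modules, group)
--     ]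
--     return "\n".join(parts).rstrip() + "\n"
-- ===== Notes on version B (the rewrite author's own statement) =====
-- stated objective: simpler
-- what changed: Drops the intermediate grouping dict: for each group in the fixed order, the module list is re-scanned with a filter and the section is built as a flat concatenation of per-group comprehensions instead of a mutated parts list.
import Mathlib
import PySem

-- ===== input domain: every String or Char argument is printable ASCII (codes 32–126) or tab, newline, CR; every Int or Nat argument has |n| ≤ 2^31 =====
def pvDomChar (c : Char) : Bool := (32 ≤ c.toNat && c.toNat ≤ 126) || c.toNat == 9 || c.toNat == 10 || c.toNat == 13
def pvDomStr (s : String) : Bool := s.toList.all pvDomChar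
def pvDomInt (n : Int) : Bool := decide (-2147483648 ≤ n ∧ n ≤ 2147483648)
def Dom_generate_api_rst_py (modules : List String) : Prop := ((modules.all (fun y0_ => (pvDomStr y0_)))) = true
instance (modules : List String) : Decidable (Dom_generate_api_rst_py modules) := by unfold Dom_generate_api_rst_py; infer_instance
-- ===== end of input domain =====

-- B drops A's intermediate grouping dict, rebuilding each group's section by re-filtering the
-- module list; return values are identical (neither mutates its argument). Objective: simpler.

-- ===== PORT A =====
-- shared module-level helpers (_RST_CHARS, _rst_heading, _module_group, _automodule_block),
-- used verbatim by both Pythons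
def rstChars : List String := ["=", "-", "~", "^"]

def rstHeading (title : String) (level : Int) : String :=
  -- index min(max(level,0),3) is always in range, so pyGetD is exact here
  let ch := PySem.List.pyGetD rstChars (min (max level 0) 3) "="
  let stripped := PySem.Str.strip title
  let text := if stripped = "" then "Untitled" else stripped  -- `or` on a string: empty is falsy
  text ++ "\n" ++ PySem.Str.join "" (List.replicate (PySem.Str.len text).toNat ch) ++ "\n"

def moduleGroup (module_name : String) : String :=
  if PySem.Str.startswith module_name "simulator.thermo.tools." then "Thermochemistry Tools"
  else if PySem.Str.startswith module_name "simulator.thermo." then "Thermochemistry Core"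
  else if PySem.Str.startswith module_name "simulator.tools." then "Engineering Tools"
  else "Simulator Core"

def packageSummaryModules : List String := ["simulator", "simulator.pumps"]

def automoduleBlock (module_name : String) : String :=
  if module_name ∈ packageSummaryModules then
    ".. automodule:: " ++ module_name ++ "\n\n"
  else
    ".. automodule:: " ++ module_name ++ "\n   :members:\n   :undoc-members:\n   :show-inheritance:\n\n"

def groupOrder : List String :=
  ["Simulator Core", "Thermochemistry Core", "Thermochemistry Tools", "Engineering Tools"]

def generate_api_rst_py (modules : List String) : String :=
  let parts0 : List String := [rstHeading "API Reference" 0]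
  -- grouped.setdefault(_module_group(mod), []).append(mod)  =  modify with default []
  let grouped : PySem.Dict String (List String) :=
    modules.foldl (fun d m => d.modify (moduleGroup m) [] (· ++ [m])) PySem.Dict.empty
  let parts : List String :=
    groupOrder.foldl (fun ps g =>
      let mods := grouped.getD g []
      if mods = [] then ps
      else mods.foldl (fun a m => a ++ [rstHeading m 2, automoduleBlock m]) (ps ++ [rstHeading g 1]))
      parts0
  PySem.Str.rstrip (PySem.Str.join "\n" parts) ++ "\n"

-- ===== PORT B =====
def groupSection (modules : List String) (g : String) : List String :=
  let mods := modules.filter (fun m => moduleGroup m == g)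
  if mods = [] then []
  else rstHeading g 1 :: mods.flatMap (fun m => [rstHeading m 2, automoduleBlock m])

def generate_api_rst_py_alt (modules : List String) : String :=
  let parts : List String :=
    rstHeading "API Reference" 0 :: groupOrder.flatMap (groupSection modules)
  PySem.Str.rstrip (PySem.Str.join "\n" parts) ++ "\n"

-- ===== PRECONDITION & SPEC =====
def Spec_generate_api_rst_py (modules : List String) (out : String) : Prop := out = generate_api_rst_py_alt modules
instance (modules : List String) (out : String) : Decidable (Spec_generate_api_rst_py modules out) := by unfold Spec_generate_api_rst_py; infer_instance

-- ===== CLAIM (what is proved, stated in full; the proofs are below) =====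
def Claim_equal_generate_api_rst_py : Prop := ∀ (modules : List String), Dom_generate_api_rst_py modules → Spec_generate_api_rst_py modules (generate_api_rst_py modules)

-- ===== LEMMAS AND PROOFS =====

-- A's grouping dict, looked up at g, is exactly B's filter of the module list.
lemma grouped_getD_eq_filter (modules : List String) (g : String) :
    (modules.foldl (fun d m => d.modify (moduleGroup m) [] (· ++ [m]))
      (PySem.Dict.empty : PySem.Dict String (List String))).getD g []
      = modules.filter (fun m => moduleGroup m == g) := by
  have h := PySem.Dict.getD_foldl_modify_append
      (l := modules.map (fun m => (moduleGroup m, m)))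
      (d := (PySem.Dict.empty : PySem.Dict String (List String))) (c := g)
  rw [List.foldl_map] at h
  simpa [List.filter_map, Function.comp_def, List.map_map] using h

theorem generate_api_rst_py_spec_aux (modules : List String) :
    generate_api_rst_py modules = generate_api_rst_py_alt modules := by
  show PySem.Str.rstrip (PySem.Str.join "\n"
      (groupOrder.foldl (fun ps g =>
        if (modules.foldl (fun d m => d.modify (moduleGroup m) [] (· ++ [m]))
            (PySem.Dict.empty : PySem.Dict String (List String))).getD g [] = [] then ps
        else ((modules.foldl (fun d m => d.modify (moduleGroup m) [] (· ++ [m]))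
            (PySem.Dict.empty : PySem.Dict String (List String))).getD g []).foldl
          (fun a m => a ++ [rstHeading m 2, automoduleBlock m]) (ps ++ [rstHeading g 1]))
        [rstHeading "API Reference" 0])) ++ "\n"
    = PySem.Str.rstrip (PySem.Str.join "\n"
      (rstHeading "API Reference" 0 :: groupOrder.flatMap (groupSection modules))) ++ "\n"
  refine congrArg (fun l => PySem.Str.rstrip (PySem.Str.join "\n" l) ++ "\n") ?_
  have hstep : ∀ (ps : List String) (g : String), g ∈ groupOrder →
      (if (modules.foldl (fun d m => d.modify (moduleGroup m) [] (· ++ [m]))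
            (PySem.Dict.empty : PySem.Dict String (List String))).getD g [] = [] then ps
        else ((modules.foldl (fun d m => d.modify (moduleGroup m) [] (· ++ [m]))
            (PySem.Dict.empty : PySem.Dict String (List String))).getD g []).foldl
          (fun a m => a ++ [rstHeading m 2, automoduleBlock m]) (ps ++ [rstHeading g 1]))
      = ps ++ groupSection modules g := by
    intro ps g _
    rw [grouped_getD_eq_filter]
    unfold groupSection
    by_cases h : modules.filter (fun m => moduleGroup m == g) = []
    · simp [h]
    · simp only [h]
      rw [PySem.List.foldl_append_eq_flatMap (g := fun m => [rstHeading m 2, automoduleBlock m])]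
      simp
  have h2 := PySem.List.foldl_congr_mem groupOrder _
      (fun ps g => ps ++ groupSection modules g) [rstHeading "API Reference" 0] hstep
  rw [h2, PySem.List.foldl_append_eq_flatMap]
  simp

-- ===== VERDICT (by name: the statement is the Claim_ definition above) =====
theorem generate_api_rst_py_spec : Claim_equal_generate_api_rst_py := by
  intro modules _
  exact generate_api_rst_py_spec_aux modules
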